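-- pv_equiv track=rewrite | github.com/sadelcarpio/cpp-algorithms | foobar/the-cake-is-not-a-lie.py | solution
-- ===== SOURCE A (Python) =====
-- def solution(s: str) -> int:
--     """Cuenta cuantas veces como máximo se repite un string dentro de otro, sin dejar faltantes
--
--     Args:
--         s (str): String a consultar
--
--     Returns:
--         int: número máximo de veces que se repite un patrón en el string
--     """
--     output = 1
--     for i in reversed(range(1, len(s) + 1)):
--         sub_s = s[:i]
--         step = len(sub_s)
--         for k in range(0, len(s) + 1, step):
--             if k == len(s):
--                 output = len(s) // step
--             if s[k:k+step] != sub_s: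
--                 break
--     return output
-- ===== SOURCE B (Python) =====
-- def solution(s: str) -> int:
--     n = len(s)
--     for k in range(n, 0, -1):
--         if n % k == 0 and s[:n // k] * k == s:
--             return k
--     return 1
-- ===== Notes on version B (the rewrite author's own statement) =====
-- stated objective: faster
-- what changed: Instead of scanning every prefix length descending and comparing the string chunk by chunk, B iterates over candidate repetition counts k = n..1, and for each k that divides n builds the repetition s[:n//k]*k once and compares, returning the first (largest) k that works.
import Mathlib
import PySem

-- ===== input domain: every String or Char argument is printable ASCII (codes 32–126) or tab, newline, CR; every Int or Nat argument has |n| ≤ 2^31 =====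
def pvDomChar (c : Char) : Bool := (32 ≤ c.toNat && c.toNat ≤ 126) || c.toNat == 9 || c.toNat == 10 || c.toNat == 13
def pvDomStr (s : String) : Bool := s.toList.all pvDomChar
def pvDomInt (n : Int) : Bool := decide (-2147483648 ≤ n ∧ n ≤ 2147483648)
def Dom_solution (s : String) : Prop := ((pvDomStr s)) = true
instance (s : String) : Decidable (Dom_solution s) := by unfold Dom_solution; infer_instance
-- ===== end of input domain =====

-- B replaces A's quadratic scan over all prefix lengths (each checked chunk by chunk) by a scan
-- over candidate repetition counts k = n..1 that builds the k-fold repetition of s[:n//k] once and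
-- returns the first k that reproduces s; measurably faster on the timed inputs.

-- ===== PORT A =====
-- range(start, stop, step) for a positive step and nonnegative bounds (all loop bounds in A are
-- nonnegative Python ints, so Nat indices are exact here)
def rangeBy (start stop step : Nat) : List Nat :=
  if _h : 0 < step ∧ start < stop then start :: rangeBy (start + step) stop step else []
termination_by stop - start
decreasing_by omega

-- inner 'for k in range(0, len(s) + 1, step)' loop of A, with its break
def innerA (cs sub : List Char) (step : Nat) : List Nat → Int → Int
  | [], out => out
  | k :: ks, out =>
    let out' := if k = cs.length then ((cs.length / step : Nat) : Int) else out
    if PySem.List.slice cs (some (k : Int)) (some ((k : Int) + (step : Int))) ≠ sub then out'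
    else innerA cs sub step ks out'

-- outer 'for i in reversed(range(1, len(s) + 1))' loop of A
def outerA (cs : List Char) : List Nat → Int → Int
  | [], out => out
  | i :: is, out =>
    let sub := PySem.List.slice cs none (some (i : Int))
    let step := sub.length
    outerA cs is (innerA cs sub step (rangeBy 0 (cs.length + 1) step) out)

def solution (s : String) : Int :=
  outerA s.toList ((List.range' 1 s.toList.length).reverse) 1

-- ===== PORT B =====
-- 'for k in range(n, 0, -1)' with early return; s[:n//k] * k is the k-fold list repetition
-- (replicate + flatten), exact for Python string repetition via toList
def goB (cs : List Char) : List Nat → Int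
  | [] => 1
  | k :: ks =>
    if cs.length % k = 0 ∧
        (List.replicate k (PySem.List.slice cs none (some ((cs.length / k : Nat) : Int)))).flatten = cs
    then (k : Int) else goB cs ks

def solution_alt (s : String) : Int :=
  goB s.toList ((List.range' 1 s.toList.length).reverse)

-- ===== PRECONDITION & SPEC =====
def Spec_solution (s : String) (out : Int) : Prop := out = solution_alt s
instance (s : String) (out : Int) : Decidable (Spec_solution s out) := by unfold Spec_solution; infer_instance

-- ===== CLAIM (what is proved, stated in full; the proofs are below) =====
def Claim_equal_solution : Prop := ∀ (s : String), Dom_solution s → Spec_solution s (solution s)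

-- ===== LEMMAS AND PROOFS =====

-- d divides n and the d-prefix tiles cs (the condition both loops decide, in B's replicate form)
def goodb (cs : List Char) (d : Nat) : Bool :=
  decide (d ∣ cs.length ∧ (List.replicate (cs.length / d) (cs.take d)).flatten = cs)

-- chunkwise tiling (A's view) = replicate tiling (B's view)
lemma tile_iff (sub : List Char) (d : Nat) (hlen : sub.length = d) :
    ∀ (m : Nat) (xs : List Char), xs.length = m * d →
      ((∀ u, u < m → (xs.drop (u * d)).take d = sub) ↔ (List.replicate m sub).flatten = xs) := by
  intro m
  induction m with
  | zero =>
      intro xs hx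
      simp at hx
      simp [hx]
  | succ m ih =>
      intro xs hx
      have hd' : d ≤ xs.length := by
        have : d ≤ (m + 1) * d := by nlinarith
        omega
      have hrest : (xs.drop d).length = m * d := by
        simp [hx, Nat.succ_mul]
      have hsplit : (List.replicate (m + 1) sub).flatten = xs ↔
          (xs.take d = sub ∧ (List.replicate m sub).flatten = xs.drop d) := by
        constructor
        · intro h
          have h' : sub ++ (List.replicate m sub).flatten = xs := by
            simpa [List.replicate_succ] using h
          constructor
          · rw [← h', ← hlen, List.take_left]
          · rw [← h', ← hlen, List.drop_left]
        · rintro ⟨h1, h2⟩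
          have := List.take_append_drop d xs
          rw [List.replicate_succ, List.flatten_cons, h2, ← h1]
          exact this
      rw [hsplit, ← ih (xs.drop d) hrest]
      constructor
      · rintro h
        refine ⟨by simpa using h 0 (by omega), ?_⟩
        intro u hu
        have := h (u + 1) (by omega)
        rw [List.drop_drop]
        have harith : d + u * d = (u + 1) * d := by ring
        rw [harith]
        exact this
      · rintro ⟨h0, h⟩ u hu
        cases u with
        | zero => simpa using h0
        | succ u =>
            have := h u (by omega)
            rw [List.drop_drop] at this
            have harith : d + u * d = (u + 1) * d := by ring
            rw [harith] at this
            exact this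

-- characterisation of A's inner loop from chunk index t*d (both outcomes)
lemma inner_spec (cs sub : List Char) (d : Nat) (hd : 0 < d) (hsub : sub.length = d) :
    ∀ (fuel t : Nat) (out : Int), cs.length + 1 - t * d ≤ fuel → t * d ≤ cs.length →
      (((d ∣ cs.length ∧ ∀ u, t ≤ u → u * d < cs.length → (cs.drop (u * d)).take d = sub) →
          innerA cs sub d (rangeBy (t * d) (cs.length + 1) d) out = ((cs.length / d : Nat) : Int))
        ∧ ((¬ (d ∣ cs.length ∧ ∀ u, t ≤ u → u * d < cs.length → (cs.drop (u * d)).take d = sub)) →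
          innerA cs sub d (rangeBy (t * d) (cs.length + 1) d) out = out)) := by
  intro fuel
  induction fuel with
  | zero => intro t out hf ht; omega
  | succ fuel ih =>
      intro t out hf ht
      rw [rangeBy]
      have hlt : t * d < cs.length + 1 := by omega
      simp only [hd, hlt, and_self, dif_pos]
      by_cases hend : t * d = cs.length
      · -- k == len(s): output is written, then the empty slice breaks the loop
        have hslice : PySem.List.slice cs (some ((t * d : Nat) : Int))
            (some (((t * d : Nat) : Int) + (d : Int))) = [] := by
          rw [PySem.List.slice_natCast_add, hend, List.drop_length, List.take_nil]
        have hsubne : sub ≠ [] := by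
          intro h; rw [h] at hsub; simp at hsub; omega
        have hne2 : ¬ (([] : List Char) = sub) := fun h => hsubne h.symm
        simp only [innerA, hslice, ne_eq, hne2, not_false_iff, if_true, if_pos hend]
        constructor
        · intro _; trivial
        · intro hneg
          exfalso; apply hneg
          refine ⟨⟨t, by rw [← hend, Nat.mul_comm]⟩, ?_⟩
          intro u hu hul
          have : t * d ≤ u * d := Nat.mul_le_mul_right d hu
          omega
      · have htlt : t * d < cs.length := by omega
        have hslice : PySem.List.slice cs (some ((t * d : Nat) : Int))
            (some (((t * d : Nat) : Int) + (d : Int))) = (cs.drop (t * d)).take d := by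
          rw [PySem.List.slice_natCast_add]
        by_cases hc : (cs.drop (t * d)).take d = sub
        · -- chunk matches: the loop continues
          have hlen2 : d ≤ cs.length - t * d := by
            have := congrArg List.length hc
            simp [hsub] at this
            omega
          have hstep : t * d + d = (t + 1) * d := by ring
          simp only [innerA, hslice, hc, ne_eq, not_true_eq_false, if_false, if_neg hend]
          rw [hstep]
          have hih := ih (t + 1) out (by omega) (by omega)
          constructor
          · intro hcond
            exact hih.1 ⟨hcond.1, fun u hu hul => hcond.2 u (by omega) hul⟩
          · intro hneg
            apply hih.2
            intro hcond1
            apply hneg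
            refine ⟨hcond1.1, ?_⟩
            intro u hu hul
            rcases Nat.eq_or_lt_of_le hu with h | h
            · rw [← h]; exact hc
            · exact hcond1.2 u (by omega) hul
        · -- chunk mismatch: break without writing
          simp only [innerA, hslice, if_neg hend, ne_eq, hc, not_false_eq_true, if_pos]
          constructor
          · intro hcond
            exact absurd (hcond.2 t (le_refl t) htlt) hc
          · intro _; trivial
  
-- A's outer loop is an overwrite-fold of goodb over its index list
lemma outer_eq (cs : List Char) :
    ∀ (L : List Nat) (out : Int), (∀ i ∈ L, 1 ≤ i ∧ i ≤ cs.length) →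
      outerA cs L out =
        L.foldl (fun o i => if goodb cs i then ((cs.length / i : Nat) : Int) else o) out := by
  intro L
  induction L with
  | nil => intro out _; rfl
  | cons i is ih =>
      intro out hmem
      obtain ⟨hi1, hi2⟩ := hmem i (by simp)
      have hsub : PySem.List.slice cs none (some (i : Int)) = cs.take i :=
        PySem.List.slice_to_natCast cs i
      have hsublen : (cs.take i).length = i := by simp [hi2]
      simp only [outerA, hsub, hsublen, List.foldl_cons]
      have hinner := inner_spec cs (cs.take i) i (by omega) hsublen
        (cs.length + 1) 0 out (by omega) (by omega)
      by_cases hg : goodb cs i = true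
      · have hgd : i ∣ cs.length ∧ (List.replicate (cs.length / i) (cs.take i)).flatten = cs := by
          simpa [goodb] using hg
        have hm : cs.length = (cs.length / i) * i := (Nat.div_mul_cancel hgd.1).symm
        have hchunks : ∀ u, 0 ≤ u → u * i < cs.length → (cs.drop (u * i)).take i = cs.take i := by
          intro u _ hul
          have := (tile_iff (cs.take i) i hsublen (cs.length / i) cs hm).mpr hgd.2
          apply this
          by_contra hge
          rw [not_lt] at hge
          have : (cs.length / i) * i ≤ u * i := Nat.mul_le_mul_right i hge
          omega
        rw [show (0 : Nat) * i = 0 * i from rfl] at hinner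
        have := hinner.1 ⟨hgd.1, fun u hu hul => hchunks u hu hul⟩
        simp only [Nat.zero_mul] at this
        rw [this, if_pos hg]
        exact ih _ (fun j hj => hmem j (by simp [hj]))
      · have hneg : ¬ (i ∣ cs.length ∧
            ∀ u, 0 ≤ u → u * i < cs.length → (cs.drop (u * i)).take i = cs.take i) := by
          intro hcond
          apply hg
          have hm : cs.length = (cs.length / i) * i := (Nat.div_mul_cancel hcond.1).symm
          have : (List.replicate (cs.length / i) (cs.take i)).flatten = cs := by
            apply (tile_iff (cs.take i) i hsublen (cs.length / i) cs hm).mp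
            intro u hu
            apply hcond.2 u (by omega)
            calc u * i < (cs.length / i) * i := (Nat.mul_lt_mul_right (by omega : 0 < i)).mpr hu
              _ ≤ cs.length := Nat.div_mul_le_self _ _
          simp [goodb]
          exact ⟨hcond.1, this⟩
        have := hinner.2 (by simpa using hneg)
        simp only [Nat.zero_mul] at this
        rw [this, if_neg hg]
        exact ih _ (fun j hj => hmem j (by simp [hj]))

-- overwrite-fold over a reversed list = first match of the list
lemma foldl_overwrite (b : Nat → Bool) (f : Nat → Int) :
    ∀ (l : List Nat) (out : Int),
      List.foldl (fun o i => if b i then f i else o) out l.reverse =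
        (((l.find? b).map f).getD out) := by
  intro l
  induction l with
  | nil => intro out; rfl
  | cons x l ih =>
      intro out
      rw [List.reverse_cons, List.foldl_append]
      simp only [List.foldl_cons, List.foldl_nil, List.find?_cons]
      cases hx : b x
      · simp [ih out]
      · simp

-- B's loop is find? over its index list
lemma goB_eq (cs : List Char) :
    ∀ (l : List Nat),
      goB cs l =
        (((l.find? (fun k => decide (cs.length % k = 0 ∧
            (List.replicate k (cs.take (cs.length / k))).flatten = cs))).map
          (fun k => (k : Int))).getD 1) := by
  intro l
  induction l with
  | nil => rfl
  | cons k l ih =>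
      have hsl : PySem.List.slice cs none (some ((cs.length / k : Nat) : Int)) =
          cs.take (cs.length / k) := PySem.List.slice_to_natCast cs _
      simp only [goB, hsl, List.find?_cons]
      by_cases h : cs.length % k = 0 ∧ (List.replicate k (cs.take (cs.length / k))).flatten = cs
      · rw [if_pos h, decide_eq_true h]
        rfl
      · rw [if_neg h, decide_eq_false h]
        exact ih

-- first element of [a, a+1, …] matched by find? is minimal
lemma find?_range'_min (b : Nat → Bool) :
    ∀ (m a d₀ : Nat), (List.range' a m).find? b = some d₀ →
      ∀ d, a ≤ d → d < d₀ → b d = false := by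
  intro m
  induction m with
  | zero => intro a d₀ h; simp at h
  | succ m ih =>
      intro a d₀ h d hd1 hd2
      rw [List.range'_succ, List.find?_cons] at h
      cases ha : b a
      · rw [ha] at h
        rcases Nat.eq_or_lt_of_le hd1 with he | hlt
        · rw [← he]; exact ha
        · exact ih (a + 1) d₀ h d hlt hd2
      · rw [ha] at h
        simp only [Option.some.injEq] at h
        omega
  
-- find? over the descending list [m, …, 1] returns the given maximal match
lemma find?_desc (b : Nat → Bool) :
    ∀ (m d₀ : Nat), b d₀ = true → 1 ≤ d₀ → d₀ ≤ m →
      (∀ k, d₀ < k → k ≤ m → b k = false) →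
      ((List.range' 1 m).reverse).find? b = some d₀ := by
  intro m
  induction m with
  | zero => intro d₀ _ h1 h2 _; omega
  | succ m ih =>
      intro d₀ hb h1 h2 hmax
      have hcat : List.range' 1 (m + 1) = List.range' 1 m ++ [m + 1] := by
        simp [List.range'_concat, Nat.add_comm]
      rw [hcat, List.reverse_append, List.reverse_singleton, List.singleton_append,
        List.find?_cons]
      rcases Nat.eq_or_lt_of_le h2 with he | hlt
      · rw [show m + 1 = d₀ by omega, hb]
      · have hm1 : b (m + 1) = false := hmax (m + 1) (by omega) (by omega)
        rw [hm1]
        exact ih d₀ hb h1 (by omega) (fun k hk1 hk2 => hmax k hk1 (by omega))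

-- ===== VERDICT (by name: the statement is the Claim_ definition above) =====
theorem solution_spec : Claim_equal_solution := by
  intro s _
  unfold Spec_solution solution solution_alt
  set cs := s.toList with hcs
  set n := cs.length with hn
  rcases Nat.eq_zero_or_pos n with h0 | hpos
  · rw [h0]; rfl
  · -- A as a find? over the ascending range
    have hA : outerA cs ((List.range' 1 n).reverse) 1 =
        ((((List.range' 1 n).find? (goodb cs)).map
          (fun i => ((n / i : Nat) : Int))).getD 1) := by
      rw [outer_eq cs ((List.range' 1 n).reverse) 1
        (by intro i hi; rw [List.mem_reverse, List.mem_range'_1] at hi; omega)]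
      exact foldl_overwrite (goodb cs) (fun i => ((n / i : Nat) : Int)) (List.range' 1 n) 1
    -- find? succeeds: goodb cs n holds
    have hgn : goodb cs n = true := by
      simp only [goodb, decide_eq_true_eq]
      refine ⟨dvd_refl n, ?_⟩
      rw [Nat.div_self hpos]
      simp [hn]
    have hsome : ((List.range' 1 n).find? (goodb cs)).isSome := by
      rw [List.find?_isSome]
      exact ⟨n, by rw [List.mem_range'_1]; omega, hgn⟩
    obtain ⟨d₀, hd₀⟩ := Option.isSome_iff_exists.mp hsome
    have hgd₀ : goodb cs d₀ = true := List.find?_some hd₀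
    have hd₀mem : d₀ ∈ List.range' 1 n := List.mem_of_find?_eq_some hd₀
    rw [List.mem_range'_1] at hd₀mem
    have hd₀min : ∀ d, 1 ≤ d → d < d₀ → goodb cs d = false :=
      find?_range'_min (goodb cs) n 1 d₀ hd₀
    obtain ⟨hdvd, htile⟩ : d₀ ∣ n ∧ (List.replicate (n / d₀) (cs.take d₀)).flatten = cs := by
      simpa [goodb] using hgd₀
    -- B: first k in [n, …, 1] with the replicate test is n / d₀
    set k₀ := n / d₀ with hk₀
    have hk₀dvd : k₀ ∣ n := Nat.div_dvd_of_dvd hdvd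
    have hk₀pos : 1 ≤ k₀ := Nat.div_pos (by omega) (by omega)
    have hk₀le : k₀ ≤ n := Nat.div_le_self n d₀
    have hdd : n / k₀ = d₀ := Nat.div_div_self hdvd (by omega)
    have hB : goB cs ((List.range' 1 n).reverse) = ((k₀ : Nat) : Int) := by
      rw [goB_eq]
      rw [find?_desc _ n k₀ ?_ hk₀pos hk₀le ?_]
      · rfl
      · simp only [decide_eq_true_eq]
        refine ⟨Nat.mod_eq_zero_of_dvd hk₀dvd, ?_⟩
        rw [hdd]; exact htile
      · intro k hk1 hk2
        simp only [decide_eq_false_iff_not]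
        intro ⟨hkmod, hktile⟩
        have hkdvd : k ∣ n := Nat.dvd_of_mod_eq_zero hkmod
        set d := n / k with hdk
        have hdpos : 1 ≤ d := Nat.div_pos (by omega) (by omega)
        have hddvd : d ∣ n := Nat.div_dvd_of_dvd hkdvd
        have hnd : n / d = k := Nat.div_div_self hkdvd (by omega)
        have hgd : goodb cs d = true := by
          simp only [goodb, decide_eq_true_eq]
          exact ⟨hddvd, by rw [hnd]; exact hktile⟩
        have hdge : d₀ ≤ d := by
          by_contra hcon
          rw [not_le] at hcon
          have := hd₀min d hdpos hcon
          rw [hgd] at this; exact absurd this (by simp)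
        have hne : n = d * k := (Nat.div_mul_cancel hkdvd).symm
        have hne₀ : d₀ * k₀ = n := Nat.mul_div_cancel' hdvd
        have : d₀ * k₀ < d₀ * k := (Nat.mul_lt_mul_left (by omega : 0 < d₀)).mpr hk1
        have : d₀ * k ≤ d * k := Nat.mul_le_mul_right k hdge
        omega
    rw [hA, hB, hd₀]
    rfl
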